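-- pv_equiv track=rewrite | github.com/eliherm/Algorithms-I | lab4/lab4_part2.py | bfi_subset_count
-- ===== SOURCE A (Python) =====
-- def bfi_subset_count(input_set, target):
--     """Returns the number of operations taken to find a subset that sums to the target"""
--     count = 0   # Count of operations
--
--     subsets = [{'elements': [], 'sum': 0}]
--     count += 1
--
--     # Iterate through the input set
--     for idx, value in enumerate(input_set):
--         new_subsets = []
--
--         # Iterate through existing subsets
--         for old_sub in subsets:
--             new_elements = old_sub['elements'].copy()
--             new_elements.append(value)
--             count += 2
--
--             # Create a new subset with the current value in input_set
--             new_sub = {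
--                 'elements': new_elements,
--                 'sum': old_sub['sum'] + value
--             }
--             count += 2
--
--             if new_sub['sum'] == target:
--                 count += 1
--                 return count
--             else:
--                 new_subsets.append(old_sub)
--                 new_subsets.append(new_sub)
--                 count += 3
--         subsets = new_subsets[:]
--         count += 1
--
--     return count
-- ===== SOURCE B (Python) =====
-- def bfi_subset_count(input_set, target):
--     """Returns the number of operations taken to find a subset that sums to the target"""
--     # The brute force increments its counter a fixed 7 times per subset examined
--     # (2 building the element list, 2 building the subset record, 3 keeping both)
--     # and once per completed pass, stopping with 2+2+1 increments on the subset
--     # whose sum hits the target.  So it suffices to track, for every reachable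
--     # sum, the position of the first subset producing it during the next pass,
--     # instead of materialising all the subsets.
--     count = 1                       # the initial list holding the empty subset
--     first_pos = {0: 0}              # reachable sum -> first position in the pass
--     width = 1                       # number of subsets examined per pass
--     for value in input_set:
--         pos = first_pos.get(target - value)
--         if pos is not None:
--             return count + 7 * pos + 5
--         nxt = {}
--         for s, j in first_pos.items():
--             for child_sum, child_pos in ((s, 2 * j), (s + value, 2 * j + 1)):
--                 if child_sum not in nxt or child_pos < nxt[child_sum]:
--                     nxt[child_sum] = child_pos
--         first_pos = nxt
--         count += 7 * width + 1
--         width *= 2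
--     return count
-- ===== Notes on version B (the rewrite author's own statement) =====
-- stated objective: alternative
-- what changed: Replaces A's breadth-first enumeration of explicit subsets (copied element lists) by a per-pass dictionary mapping each reachable sum to the first subset position producing it, deriving the operation count from the fixed 7-per-subset cost of a pass; much cheaper when many subsets share a sum, same worst case.
import Mathlib
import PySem

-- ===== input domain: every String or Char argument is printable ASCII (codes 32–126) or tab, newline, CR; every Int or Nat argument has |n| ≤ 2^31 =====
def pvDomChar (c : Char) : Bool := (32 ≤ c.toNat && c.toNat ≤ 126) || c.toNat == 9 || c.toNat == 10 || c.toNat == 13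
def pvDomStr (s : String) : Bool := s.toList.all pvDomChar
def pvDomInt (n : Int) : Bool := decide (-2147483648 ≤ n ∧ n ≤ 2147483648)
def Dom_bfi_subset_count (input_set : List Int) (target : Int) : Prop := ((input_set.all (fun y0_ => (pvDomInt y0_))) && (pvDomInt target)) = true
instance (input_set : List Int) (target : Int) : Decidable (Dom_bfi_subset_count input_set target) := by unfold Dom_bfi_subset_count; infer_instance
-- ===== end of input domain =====

-- B replaces A's explicit breadth-first enumeration of subsets (lists of elements)
-- by a per-pass dictionary from reachable sum to the first position producing it,
-- computing the operation count from the 7-per-subset cost of a pass.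

-- ===== PORT A =====
-- subsets are (elements, sum) pairs; the inner loop may return early (.error = Python `return`)
def pvInnerA (value target : Int) :
    List (List Int × Int) → List (List Int × Int) → Int → Except Int (List (List Int × Int) × Int)
  | [], new_subsets, count => .ok (new_subsets, count)
  | (elems, s) :: rest, new_subsets, count =>
    let new_elements := elems ++ [value]
    let count := count + 2
    let new_sub := (new_elements, s + value)
    let count := count + 2
    if new_sub.2 = target then .error (count + 1)
    else pvInnerA value target rest (new_subsets ++ [(elems, s), new_sub]) (count + 3)

def pvOuterA (target : Int) : List Int → List (List Int × Int) → Int → Int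
  | [], _, count => count
  | value :: rest, subsets, count =>
    match pvInnerA value target subsets [] count with
    | .error c => c
    | .ok (ns, c) => pvOuterA target rest ns (c + 1)

def bfi_subset_count (input_set : List Int) (target : Int) : Int :=
  pvOuterA target input_set [([], 0)] 1

-- ===== PORT B =====
-- `if child_sum not in nxt or child_pos < nxt[child_sum]: nxt[child_sum] = child_pos`
def pvUpdB (nxt : PySem.Dict Int Int) (cs cp : Int) : PySem.Dict Int Int :=
  match nxt.get? cs with
  | none => nxt.insert cs cp
  | some old => if cp < old then nxt.insert cs cp else nxt

-- `for s, j in first_pos.items(): for child_sum, child_pos in ((s, 2*j), (s+value, 2*j+1)): …`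
def pvStepB (value : Int) (first_pos : PySem.Dict Int Int) : PySem.Dict Int Int :=
  first_pos.items.foldl
    (fun nxt p => pvUpdB (pvUpdB nxt p.1 (2 * p.2)) (p.1 + value) (2 * p.2 + 1))
    PySem.Dict.empty

def pvLoopB (target : Int) : List Int → Int → PySem.Dict Int Int → Int → Int
  | [], count, _, _ => count
  | value :: rest, count, first_pos, width =>
    match first_pos.get? (target - value) with
    | some pos => count + 7 * pos + 5
    | none => pvLoopB target rest (count + 7 * width + 1) (pvStepB value first_pos) (width * 2)

def bfi_subset_count_alt (input_set : List Int) (target : Int) : Int :=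
  pvLoopB target input_set 1 (PySem.Dict.empty.insert 0 0) 1

-- ===== PRECONDITION & SPEC =====
def Spec_bfi_subset_count (input_set : List Int) (target : Int) (out : Int) : Prop := out = bfi_subset_count_alt input_set target
instance (input_set : List Int) (target : Int) (out : Int) : Decidable (Spec_bfi_subset_count input_set target out) := by unfold Spec_bfi_subset_count; infer_instance

-- ===== CLAIM (what is proved, stated in full; the proofs are below) =====
def Claim_equal_bfi_subset_count : Prop := ∀ (input_set : List Int) (target : Int), Dom_bfi_subset_count input_set target → Spec_bfi_subset_count input_set target (bfi_subset_count input_set target)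

-- ===== LEMMAS AND PROOFS =====

-- ghost spec: the list of sums of A's stage subsets, and its doubling step
def pvDbl (v : Int) (L : List Int) : List Int := L.flatMap (fun s => [s, s + v])

-- index (as an Int) of the first occurrence of k in L
def pvFidx (k : Int) : List Int → Option Int
  | [] => none
  | s :: tl => if s = k then some 0 else (pvFidx k tl).map (· + 1)

-- min on Option Int with none = +∞
def pvOmin : Option Int → Option Int → Option Int
  | none, b => b
  | some a, none => some a
  | some a, some b => some (min a b)

-- first value stored under key k in an association list
def pvLook (k : Int) : List (Int × Int) → Option Int
  | [] => none
  | p :: tl => if p.1 = k then some p.2 else pvLook k tl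

theorem pvOmin_none_right (a : Option Int) : pvOmin a none = a := by
  cases a <;> rfl

theorem pvOmin_comm (a b : Option Int) : pvOmin a b = pvOmin b a := by
  cases a <;> cases b <;> simp [pvOmin, min_comm]

theorem pvOmin_assoc (a b c : Option Int) : pvOmin (pvOmin a b) c = pvOmin a (pvOmin b c) := by
  cases a <;> cases b <;> cases c <;> simp [pvOmin, min_assoc]

theorem pvFidx_nonneg (k : Int) : ∀ L j, pvFidx k L = some j → 0 ≤ j := by
  intro L
  induction L with
  | nil => intro j h; simp [pvFidx] at h
  | cons s tl ih =>
    intro j h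
    by_cases hs : s = k
    · simp [pvFidx, hs] at h; omega
    · simp [pvFidx, hs] at h
      obtain ⟨j', hj', rfl⟩ := h
      have := ih j' hj'; omega

theorem pvFidx_dbl (v k : Int) : ∀ L,
    pvFidx k (pvDbl v L) =
      pvOmin ((pvFidx k L).map (fun a => 2 * a)) ((pvFidx (k - v) L).map (fun b => 2 * b + 1)) := by
  intro L
  induction L with
  | nil => simp [pvDbl, pvFidx, pvOmin]
  | cons s tl ih =>
    have hdbl : pvDbl v (s :: tl) = s :: (s + v) :: pvDbl v tl := by
      simp [pvDbl]
    rw [hdbl]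
    by_cases hs : s = k
    · -- head sum hits k: first position 0
      subst hs
      have h1 : pvFidx s (s :: tl) = some 0 := by simp [pvFidx]
      rw [h1]
      by_cases hv : s = s - v
      · have : pvFidx (s - v) (s :: tl) = some 0 := by simp [pvFidx, ← hv]
        rw [this]
        simp [pvFidx, pvOmin]
      · rw [show pvFidx (s - v) (s :: tl) = (pvFidx (s - v) tl).map (· + 1) by
            simp [pvFidx, hv]]
        cases h2 : pvFidx (s - v) tl with
        | none => simp [pvFidx, pvOmin]
        | some b =>
          have hb := pvFidx_nonneg _ _ _ h2
          simp [pvFidx, pvOmin]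
          omega
    · -- head misses k
      by_cases hv : s = k - v
      · -- second child hits k at position 1
        have hk : s + v = k := by omega
        have hL : pvFidx k (s :: (s + v) :: pvDbl v tl) = some 1 := by
          simp [pvFidx, hs, hk]
        have hR2 : pvFidx (k - v) (s :: tl) = some 0 := by simp [pvFidx, hv.symm]
        rw [hL, hR2, show pvFidx k (s :: tl) = (pvFidx k tl).map (· + 1) by simp [pvFidx, hs]]
        cases h2 : pvFidx k tl with
        | none => simp [pvOmin]
        | some a =>
          have ha := pvFidx_nonneg _ _ _ h2
          simp [pvOmin]
          omega
      · -- both children miss k; shift by 2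
        have hk : s + v ≠ k := by omega
        have hL : pvFidx k (s :: (s + v) :: pvDbl v tl) = (pvFidx k (pvDbl v tl)).map (· + 2) := by
          simp [pvFidx, hs, hk]
        rw [hL, ih,
            show pvFidx k (s :: tl) = (pvFidx k tl).map (· + 1) by simp [pvFidx, hs],
            show pvFidx (k - v) (s :: tl) = (pvFidx (k - v) tl).map (· + 1) by
              simp [pvFidx, hv]]
        cases pvFidx k tl <;> cases pvFidx (k - v) tl <;>
          simp [pvOmin, min_def] <;> (try split_ifs) <;> omega

theorem pvLook_eq_none (k : Int) : ∀ ps : List (Int × Int), k ∉ ps.map Prod.fst → pvLook k ps = none := by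
  intro ps
  induction ps with
  | nil => intro _; rfl
  | cons p tl ih =>
    intro h
    simp only [List.map_cons, List.mem_cons, not_or] at h
    rw [pvLook, if_neg (fun he => h.1 he.symm), ih h.2]

theorem get?_pvUpdB (nxt : PySem.Dict Int Int) (cs cp k : Int) :
    (pvUpdB nxt cs cp).get? k = if k = cs then pvOmin (nxt.get? k) (some cp) else nxt.get? k := by
  unfold pvUpdB
  cases h : nxt.get? cs with
  | none =>
    rw [PySem.Dict.get?_insert]
    by_cases hk : k = cs
    · simp [hk, h, pvOmin]
    · simp [hk]
  | some old =>
    dsimp only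
    by_cases hlt : cp < old
    · rw [if_pos hlt, PySem.Dict.get?_insert]
      by_cases hk : k = cs
      · simp [hk, h, pvOmin]; omega
      · simp [hk]
    · rw [if_neg hlt]
      by_cases hk : k = cs
      · simp [hk, h, pvOmin]; omega
      · simp [hk]

theorem nodup_keys_pvUpdB (nxt : PySem.Dict Int Int) (cs cp : Int) (h : nxt.keys.Nodup) :
    (pvUpdB nxt cs cp).keys.Nodup := by
  unfold pvUpdB
  cases nxt.get? cs with
  | none => exact PySem.Dict.nodup_keys_insert _ _ _ h
  | some old =>
    dsimp only
    by_cases hlt : cp < old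
    · rw [if_pos hlt]; exact PySem.Dict.nodup_keys_insert _ _ _ h
    · rw [if_neg hlt]; exact h

theorem get?_foldUpd (v : Int) : ∀ (ps : List (Int × Int)) (nd : PySem.Dict Int Int) (k : Int),
    (ps.map Prod.fst).Nodup →
    (ps.foldl (fun nxt p => pvUpdB (pvUpdB nxt p.1 (2 * p.2)) (p.1 + v) (2 * p.2 + 1)) nd).get? k
      = pvOmin (nd.get? k)
          (pvOmin ((pvLook k ps).map (fun a => 2 * a)) ((pvLook (k - v) ps).map (fun b => 2 * b + 1))) := by
  intro ps
  induction ps with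
  | nil => intro nd k _; simp [pvLook, pvOmin_none_right]
  | cons p tl ih =>
    intro nd k hnd
    obtain ⟨s, j⟩ := p
    simp only [List.map_cons, List.nodup_cons] at hnd
    obtain ⟨hs_not, htl⟩ := hnd
    rw [List.foldl_cons, ih _ _ htl]
    rw [get?_pvUpdB, get?_pvUpdB]
    by_cases hk : k = s
    · have hlk : pvLook k ((s, j) :: tl) = some j := by simp [pvLook, hk]
      have htlk : pvLook k tl = none := pvLook_eq_none _ _ (hk ▸ hs_not)
      by_cases hv : k = s + v
      · -- v = 0 and k = s: both children write to k
        have hkv : k - v = k := by omega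
        rw [hlk, if_pos hv, if_pos hk, hkv, hlk, htlk]
        simp only [Option.map_some, Option.map_none]
        rw [pvOmin_assoc, pvOmin_assoc]
        congr 1
      · have hkv : k - v ≠ s := by omega
        have hlkv : pvLook (k - v) ((s, j) :: tl) = pvLook (k - v) tl := by
          rw [pvLook, if_neg (fun he => hkv he.symm)]
        rw [hlk, hlkv, if_neg hv, if_pos hk, htlk]
        simp only [Option.map_some, Option.map_none]
        rw [pvOmin_assoc]
        congr 1
    · have hlk : pvLook k ((s, j) :: tl) = pvLook k tl := by
        rw [pvLook, if_neg (fun he => hk he.symm)]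
      by_cases hv : k = s + v
      · have hkv : k - v = s := by omega
        have hlkv : pvLook (k - v) ((s, j) :: tl) = some j := by simp [pvLook, hkv]
        have htlkv : pvLook (k - v) tl = none := pvLook_eq_none _ _ (hkv ▸ hs_not)
        rw [hlk, hlkv, if_pos hv, if_neg hk, htlkv]
        simp only [Option.map_some, Option.map_none]
        rw [pvOmin_none_right, pvOmin_assoc]
        congr 1
        exact pvOmin_comm _ _
      · have hkv : k - v ≠ s := by omega
        have hlkv : pvLook (k - v) ((s, j) :: tl) = pvLook (k - v) tl := by
          rw [pvLook, if_neg (fun he => hkv he.symm)]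
        rw [hlk, hlkv, if_neg hv, if_neg hk]

theorem nodup_keys_foldUpd (v : Int) : ∀ (ps : List (Int × Int)) (nd : PySem.Dict Int Int),
    nd.keys.Nodup →
    (ps.foldl (fun nxt p => pvUpdB (pvUpdB nxt p.1 (2 * p.2)) (p.1 + v) (2 * p.2 + 1)) nd).keys.Nodup := by
  intro ps
  induction ps with
  | nil => intro nd h; exact h
  | cons p tl ih =>
    intro nd h
    exact ih _ (nodup_keys_pvUpdB _ _ _ (nodup_keys_pvUpdB _ _ _ h))

theorem get?_eq_pvLook (d : PySem.Dict Int Int) (k : Int) : d.get? k = pvLook k d.items := by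
  obtain ⟨l⟩ := d
  induction l with
  | nil => rfl
  | cons p tl ih =>
    obtain ⟨a, b⟩ := p
    rw [show (PySem.Dict.mk ((a, b) :: tl) : PySem.Dict Int Int).items = (a, b) :: tl from rfl,
        PySem.Dict.get?_mk_cons, pvLook]
    by_cases h : a = k
    · simp [h]
    · simp [h]
      simpa using ih

theorem get?_pvStepB (v : Int) (d : PySem.Dict Int Int) (L : List Int) (k : Int)
    (hnd : d.keys.Nodup) (hget : ∀ k, d.get? k = pvFidx k L) :
    (pvStepB v d).get? k = pvFidx k (pvDbl v L) := by
  have hkeys : (d.items.map Prod.fst).Nodup := hnd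
  rw [pvStepB, get?_foldUpd v d.items PySem.Dict.empty k hkeys,
      PySem.Dict.get?_empty, ← get?_eq_pvLook, ← get?_eq_pvLook, hget, hget, pvFidx_dbl]
  rfl

theorem nodup_keys_pvStepB (v : Int) (d : PySem.Dict Int Int) : (pvStepB v d).keys.Nodup := by
  exact nodup_keys_foldUpd v d.items PySem.Dict.empty PySem.Dict.nodup_keys_empty

theorem length_pvDbl (v : Int) : ∀ L : List Int, (pvDbl v L).length = 2 * L.length := by
  intro L
  induction L with
  | nil => rfl
  | cons s tl ih => simp [pvDbl] at ih ⊢; omega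

theorem map_snd_flatMap (v : Int) : ∀ l : List (List Int × Int),
    (l.flatMap (fun p => [p, (p.1 ++ [v], p.2 + v)])).map Prod.snd = pvDbl v (l.map Prod.snd) := by
  intro l
  induction l with
  | nil => rfl
  | cons p tl ih => simp [pvDbl, List.flatMap_cons] at ih ⊢; exact ih

theorem pvInnerA_eq (value target : Int) : ∀ (l acc : List (List Int × Int)) (c : Int),
    pvInnerA value target l acc c =
      match pvFidx (target - value) (l.map Prod.snd) with
      | some j => .error (c + 7 * j + 5)
      | none => .ok (acc ++ l.flatMap (fun p => [p, (p.1 ++ [value], p.2 + value)]), c + 7 * l.length) := by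
  intro l
  induction l with
  | nil => intro acc c; simp [pvInnerA, pvFidx]
  | cons p tl ih =>
    intro acc c
    obtain ⟨e, s⟩ := p
    by_cases h : s + value = target
    · have hs : s = target - value := by omega
      simp only [pvInnerA, List.map_cons, pvFidx, if_pos h, if_pos hs]
      congr 1
      omega
    · have hs : s ≠ target - value := by omega
      simp only [pvInnerA, List.map_cons, pvFidx, if_neg h, if_neg hs]
      rw [ih]
      cases htl : pvFidx (target - value) (tl.map Prod.snd) with
      | some j =>
        simp only [Option.map_some]
        congr 1
        omega
      | none =>
        simp only [Option.map_none, List.flatMap_cons]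
        congr 1
        refine Prod.ext ?_ ?_
        · simp
        · simp; ring

theorem pvMain (target : Int) : ∀ (rest : List Int) (subs : List (List Int × Int))
    (L : List Int) (d : PySem.Dict Int Int) (c w : Int),
    subs.map Prod.snd = L →
    d.keys.Nodup →
    (∀ k, d.get? k = pvFidx k L) →
    w = (L.length : Int) →
    pvOuterA target rest subs c = pvLoopB target rest c d w := by
  intro rest
  induction rest with
  | nil => intro subs L d c w _ _ _ _; rfl
  | cons value rest ih =>
    intro subs L d c w hL hnd hget hw
    rw [pvOuterA, pvLoopB, pvInnerA_eq, hL, ← hget (target - value)]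
    cases hidx : d.get? (target - value) with
    | some j => rfl
    | none =>
      simp only []
      have hlen : (subs.length : Int) = w := by
        rw [hw, ← hL, List.length_map]
      have hcount : c + 7 * (subs.length : Int) + 1 = c + 7 * w + 1 := by omega
      rw [List.nil_append, hcount]
      exact ih _ (pvDbl value L) (pvStepB value d) _ _
        (map_snd_flatMap value subs ▸ congrArg (pvDbl value) hL)
        (nodup_keys_pvStepB value d)
        (fun k => get?_pvStepB value d L k hnd (fun k => (hget k).symm ▸ (hget k)))
        (by rw [length_pvDbl]; push_cast; omega)

-- ===== VERDICT (by name: the statement is the Claim_ definition above) =====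
theorem bfi_subset_count_spec : Claim_equal_bfi_subset_count := by
  intro input_set target _
  unfold Spec_bfi_subset_count bfi_subset_count bfi_subset_count_alt
  exact pvMain target input_set [([], 0)] [0] (PySem.Dict.empty.insert 0 0) 1 1
    (by simp)
    (by decide)
    (by
      intro k
      rw [PySem.Dict.get?_insert]
      by_cases h : k = 0
      · simp [h, pvFidx]
      · simp [h, pvFidx, Ne.symm h, PySem.Dict.get?_empty])
    (by simp)
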